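-- pv_equiv track=rewrite | github.com/konrad-kocik/advent-of-code | 2020/day_14_docking_data/computer.py | _get_addresses_permutations
-- ===== SOURCE A (Python) =====
-- def _get_addresses_permutations(masked_address):
--     addresses = []
--
--     for bits in _get_bits_permutations(masked_address.count('X')):
--         address = masked_address
--
--         for bit in bits:
--             address = address.replace('X', bit, 1)
--
--         addresses.append(address)
--
--     return addresses
--
-- def _get_bits_permutations(floating_bit_count):
--     return [str(bin(number)).replace('0b', '').zfill(floating_bit_count) for number in range(2 ** floating_bit_count)]
-- ===== SOURCE B (Python) =====
-- def _get_addresses_permutations(masked_address):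
--     # Split once on 'X'; one pass over the fixed segments, branching every
--     # partial address on '0'/'1' instead of formatting binary numbers and
--     # replacing wildcards one at a time.
--     parts = masked_address.split('X')
--     addresses = [parts[0]]
--
--     for part in parts[1:]:
--         addresses = [address + bit + part for address in addresses for bit in '01']
--
--     return addresses
-- ===== Notes on version B (the rewrite author's own statement) =====
-- stated objective: alternative
-- what changed: B splits the masked address once on its wildcard character and expands partial addresses segment by segment, branching each on the two bit characters, instead of enumerating binary numbers, formatting and zero-filling them and running one full-string replace scan per bit.
import Mathlib
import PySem

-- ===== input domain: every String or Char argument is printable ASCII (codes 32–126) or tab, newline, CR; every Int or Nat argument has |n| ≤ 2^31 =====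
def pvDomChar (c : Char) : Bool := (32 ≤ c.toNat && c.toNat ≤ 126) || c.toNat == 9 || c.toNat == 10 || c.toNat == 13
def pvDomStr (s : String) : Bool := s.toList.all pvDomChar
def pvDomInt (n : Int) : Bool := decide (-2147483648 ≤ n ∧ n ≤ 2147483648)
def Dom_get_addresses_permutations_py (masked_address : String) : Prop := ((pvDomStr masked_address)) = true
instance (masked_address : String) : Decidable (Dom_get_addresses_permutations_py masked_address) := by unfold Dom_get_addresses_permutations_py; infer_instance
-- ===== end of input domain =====

-- B splits the string once on 'X' and expands partial addresses segment by segment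
-- instead of enumerating zero-filled binary strings and doing a replace('X',bit,1)
-- scan per bit (a different algorithm of similar cost).

-- ===== PORT A =====
-- exact port of address.replace('X', bit, 1): single-character pattern, first
-- occurrence only (PySem.Chars.replace has no count argument)
def pvReplaceFirstX : List Char → Char → List Char
  | [], _ => []
  | c :: t, b => if c = 'X' then b :: t else c :: pvReplaceFirstX t b

-- port of _get_bits_permutations (str(bin(number)) = bin(number), a str already)
def pvBitsPerms (k : Nat) : List (List Char) :=
  (PySem.List.pyRange 0 ((2 : Int) ^ k) 1).map
    (fun number =>
      PySem.Chars.zfill (PySem.Chars.replace (PySem.Int.toBinChars0b number) ['0', 'b'] []) (k : Int))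

def get_addresses_permutations_py (masked_address : String) : List String :=
  (pvBitsPerms (PySem.Str.count masked_address "X")).foldl
    (fun addresses bits =>
      addresses ++
        [String.ofList (bits.foldl (fun address bit => pvReplaceFirstX address bit) masked_address.toList)])
    []

-- ===== PORT B =====
def get_addresses_permutations_py_alt (masked_address : String) : List String :=
  let parts := PySem.Chars.splitOn masked_address.toList ['X']   -- parts[0] exists: split never returns []
  (parts.tail.foldl
      (fun addresses part =>
        addresses.flatMap (fun address => ['0', '1'].map (fun bit => address ++ [bit] ++ part)))
      [parts.headD []]).map String.ofList

-- ===== PRECONDITION & SPEC =====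
def Spec_get_addresses_permutations_py (masked_address : String) (out : List String) : Prop := out = get_addresses_permutations_py_alt masked_address
instance (masked_address : String) (out : List String) : Decidable (Spec_get_addresses_permutations_py masked_address out) := by unfold Spec_get_addresses_permutations_py; infer_instance

-- ===== CLAIM (what is proved, stated in full; the proofs are below) =====
def Claim_equal_get_addresses_permutations_py : Prop := ∀ (masked_address : String), Dom_get_addresses_permutations_py masked_address → Spec_get_addresses_permutations_py masked_address (get_addresses_permutations_py masked_address)

-- ===== LEMMAS AND PROOFS =====

-- the binary digits of n, most significant first (what bin(n) prints after '0b')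
def pvDigits (n : Nat) : List Char :=
  if n < 2 then [Nat.digitChar n] else pvDigits (n / 2) ++ [Nat.digitChar (n % 2)]
decreasing_by exact Nat.div_lt_self (by omega) (by omega)

-- the k low binary digits of n, most significant first
def pvNatBits : Nat → Nat → List Char
  | 0, _ => []
  | k + 1, n => pvNatBits k (n / 2) ++ [Nat.digitChar (n % 2)]

-- all k-bit strings in counting order
def pvBS : Nat → List (List Char)
  | 0 => [[]]
  | k + 1 => (pvBS k).map ('0' :: ·) ++ (pvBS k).map ('1' :: ·)

-- fill the 'X' positions of l with the given bits, left to right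
def pvFill : List Char → List Char → List Char
  | [], _ => []
  | c :: t, bs =>
    if c = 'X' then
      match bs with
      | [] => c :: t
      | b :: bs' => b :: pvFill t bs'
    else c :: pvFill t bs

-- all fillings of l, first 'X' most significant
def pvPerms : List Char → List (List Char)
  | [] => [[]]
  | c :: t =>
    if c = 'X' then (pvPerms t).map ('0' :: ·) ++ (pvPerms t).map ('1' :: ·)
    else (pvPerms t).map (c :: ·)

-- l.split('X') as a structural recursion
def pvSplit : List Char → List (List Char)
  | [] => [[]]
  | c :: t => if c = 'X' then [] :: pvSplit t else (pvSplit t).modifyHead (c :: ·)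

-- all concatenations bit::p over the segment list, first bit most significant
def pvCombos : List (List Char) → List (List Char)
  | [] => [[]]
  | p :: ps => (pvCombos ps).map (('0' :: p) ++ ·) ++ (pvCombos ps).map (('1' :: p) ++ ·)

lemma count_go_X (l : List Char) : ∀ (fuel : Nat) (acc : Nat), l.length ≤ fuel →
    PySem.Chars.count.go ['X'] fuel l acc = acc + l.count 'X' := by
  induction l with
  | nil => intro fuel acc _; cases fuel <;> simp [PySem.Chars.count.go]
  | cons c t ih =>
    intro fuel acc hf
    cases fuel with
    | zero => simp at hf
    | succ f =>
      by_cases hc : c = 'X'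
      · subst hc
        simp only [PySem.Chars.count.go, List.isPrefixOf, BEq.rfl, Bool.and_eq_true,
          and_true]
        simp only [List.length_cons] at hf
        rw [if_pos trivial]
        have hd : List.drop ['X'].length ('X' :: t) = t := by simp
        rw [hd, ih f (acc + 1) (by omega)]
        simp [List.count_cons]
        omega
      · have hpre : List.isPrefixOf ['X'] (c :: t) = false := by
          simp [List.isPrefixOf]; exact fun h => (hc h.symm).elim
        simp only [PySem.Chars.count.go, hpre]
        simp only [List.length_cons] at hf
        rw [if_neg (by simp [hpre])]
        rw [ih f acc (by omega)]
        simp [List.count_cons, hc]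

lemma count_X (s : String) : PySem.Str.count s "X" = s.toList.count 'X' := by
  have hx : ("X" : String).toList = ['X'] := rfl
  simp only [PySem.Str.count, hx, PySem.Chars.count]
  rw [if_neg (by simp)]
  rw [count_go_X s.toList s.toList.length 0 le_rfl]
  omega

lemma replace_go_noB (l : List Char) : ∀ (fuel : Nat) (acc : List Char), l.length ≤ fuel → 'b' ∉ l →
    PySem.Chars.replace.go ['0', 'b'] [] fuel l acc = acc.reverse ++ l := by
  induction l with
  | nil => intro fuel acc _ _; cases fuel <;> simp [PySem.Chars.replace.go]
  | cons c t ih =>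
    intro fuel acc hf hb
    cases fuel with
    | zero => simp at hf
    | succ f =>
      have hpre : List.isPrefixOf ['0', 'b'] (c :: t) = false := by
        by_contra h
        have h' : ['0', 'b'] <+: c :: t := by
          rw [← List.isPrefixOf_iff_prefix]
          simpa using h
        obtain ⟨r, hr⟩ := h'
        apply hb
        rw [← hr]; simp
      simp only [PySem.Chars.replace.go, hpre]
      rw [if_neg (by simp [hpre])]
      simp only [List.length_cons] at hf
      rw [ih f (c :: acc) (by omega) (by intro h; exact hb (List.mem_cons_of_mem _ h))]
      simp

lemma replace_0b (l : List Char) (hb : 'b' ∉ l) :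
    PySem.Chars.replace ('0' :: 'b' :: l) ['0', 'b'] [] = l := by
  simp only [PySem.Chars.replace, List.isEmpty_cons, if_neg]
  have h1 : ('0' :: 'b' :: l).length = l.length + 2 := by simp
  rw [h1]
  have : PySem.Chars.replace.go ['0', 'b'] [] (l.length + 2) ('0' :: 'b' :: l) []
      = PySem.Chars.replace.go ['0', 'b'] [] (l.length + 1) l [] := by
    simp only [PySem.Chars.replace.go]
    rw [if_pos (by simp [List.isPrefixOf])]
    simp
  rw [this, replace_go_noB l (l.length + 1) [] (by omega) hb]
  simp

lemma toDigitsCore_two (n : Nat) : ∀ (fuel : Nat) (ds : List Char), n < fuel →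
    Nat.toDigitsCore 2 fuel n ds = pvDigits n ++ ds := by
  induction n using Nat.strong_induction_on with
  | _ n ih =>
    intro fuel ds hf
    cases fuel with
    | zero => omega
    | succ f =>
      simp only [Nat.toDigitsCore]
      by_cases h2 : n / 2 = 0
      · rw [if_pos h2]
        have hn2 : n < 2 := by omega
        rw [pvDigits, if_pos hn2]
        have : n % 2 = n := Nat.mod_eq_of_lt hn2
        rw [this]
        simp
      · rw [if_neg h2]
        have hn2 : ¬ n < 2 := by omega
        rw [ih (n / 2) (by omega) f ((n % 2).digitChar :: ds) (by omega)]
        conv_rhs => rw [pvDigits]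
        rw [if_neg hn2]
        simp

lemma toBinChars0b_nat (n : Nat) :
    PySem.Int.toBinChars0b (n : Int) = '0' :: 'b' :: pvDigits n := by
  simp only [PySem.Int.toBinChars0b]
  rw [if_neg (by omega)]
  simp only [Int.toNat_natCast, Nat.toDigits]
  rw [toDigitsCore_two n (n + 1) [] (Nat.lt_succ_self n)]
  simp

lemma pvDigits_mem {n : Nat} {c : Char} (h : c ∈ pvDigits n) : c = '0' ∨ c = '1' := by
  induction n using Nat.strong_induction_on with
  | _ n ih =>
    by_cases hn : n < 2
    · rw [pvDigits, if_pos hn] at h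
      simp at h
      subst h
      interval_cases n
      · left; rfl
      · right; rfl
    · rw [pvDigits, if_neg hn] at h
      rcases List.mem_append.mp h with h' | h'
      · exact ih (n / 2) (Nat.div_lt_self (by omega) (by omega)) h'
      · simp at h'
        subst h'
        have : n % 2 = 0 ∨ n % 2 = 1 := by omega
        rcases this with h'' | h'' <;> rw [h'']
        · left; rfl
        · right; rfl

lemma pvDigits_ne_nil (n : Nat) : pvDigits n ≠ [] := by
  by_cases hn : n < 2 <;> rw [pvDigits] <;> simp [hn]

lemma pvDigits_length_le {n k : Nat} (h1 : 1 ≤ k) (h2 : n < 2 ^ k) :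
    (pvDigits n).length ≤ k := by
  induction n using Nat.strong_induction_on generalizing k with
  | _ n ih =>
    by_cases hn : n < 2
    · rw [pvDigits, if_pos hn]
      simpa using h1
    · rw [pvDigits, if_neg hn]
      have hk2 : 2 ≤ k := by
        by_contra hk
        have : k = 1 := by omega
        subst this
        omega
      have hdiv : n / 2 < 2 ^ (k - 1) := by
        have : 2 ^ k = 2 ^ (k - 1) * 2 := by
          rw [← pow_succ]
          congr 1
          omega
        rw [Nat.div_lt_iff_lt_mul (by omega)]
        omega
      have := ih (n / 2) (Nat.div_lt_self (by omega) (by omega)) (k := k - 1) (by omega) hdiv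
      simp only [List.length_append, List.length_cons, List.length_nil]
      omega

lemma pvNatBits_zero (k : Nat) : pvNatBits k 0 = List.replicate k '0' := by
  induction k with
  | zero => rfl
  | succ k ih =>
    rw [pvNatBits]
    simp [ih, List.replicate_succ']
    rfl

lemma pvNatBits_eq_pad {k n : Nat} (h1 : 1 ≤ k) (h2 : n < 2 ^ k) :
    pvNatBits k n = List.replicate (k - (pvDigits n).length) '0' ++ pvDigits n := by
  obtain ⟨k', rfl⟩ : ∃ k', k = k' + 1 := ⟨k - 1, by omega⟩
  clear h1
  induction k' generalizing n with
  | zero =>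
    have hn : n < 2 := by simpa using h2
    rw [pvNatBits, pvNatBits]
    rw [pvDigits, if_pos hn]
    rw [Nat.mod_eq_of_lt hn]
    simp
  | succ k ih =>
    rw [pvNatBits]
    by_cases hn : n < 2
    · have : n / 2 = 0 := by omega
      rw [this, pvNatBits_zero]
      rw [pvDigits, if_pos hn, Nat.mod_eq_of_lt hn]
      simp [List.replicate_succ']
    · have h2' : n < 2 ^ (k + 1) * 2 := by rw [← pow_succ]; exact h2
      have hdiv : n / 2 < 2 ^ (k + 1) := by
        rw [Nat.div_lt_iff_lt_mul (by omega)]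
        exact h2' 
      rw [ih hdiv]
      conv_rhs => rw [pvDigits]
      rw [if_neg hn]
      have hlen : (pvDigits (n / 2)).length + 1 ≤ k + 1 + 1 := by
        have := pvDigits_length_le (n := n / 2) (k := k + 1) (by omega) hdiv
        omega
      simp only [List.length_append, List.length_cons, List.length_nil]
      rw [List.append_assoc]
      have he : k + 1 + 1 - ((pvDigits (n / 2)).length + 1) = k + 1 - (pvDigits (n / 2)).length := by
        omega
      rw [he]

lemma zfill_digits {k n : Nat} (h1 : 1 ≤ k) (h2 : n < 2 ^ k) :
    PySem.Chars.zfill (pvDigits n) (k : Int) = pvNatBits k n := by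
  have hlen : (pvDigits n).length ≤ k := pvDigits_length_le h1 h2
  obtain ⟨c, rest, hc⟩ := List.exists_cons_of_ne_nil (pvDigits_ne_nil n)
  have hcmem : c = '0' ∨ c = '1' := pvDigits_mem (by rw [hc]; exact List.mem_cons_self)
  rw [pvNatBits_eq_pad h1 h2]
  simp only [PySem.Chars.zfill]
  by_cases heq : (k : Int) ≤ (pvDigits n).length
  · rw [if_pos heq]
    have : (pvDigits n).length = k := by omega
    rw [this]
    simp
  · rw [if_neg heq]
    rw [hc]
    have hpm : ¬ (c = '+' ∨ c = '-') := by
      rcases hcmem with h | h <;> subst h <;> decide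
    simp only [if_neg hpm, Int.toNat_natCast]

lemma range_double {α : Type} (M : Nat) (f : Nat → α) :
    (List.range (2 * M)).map f = (List.range M).flatMap (fun m => [f (2 * m), f (2 * m + 1)]) := by
  induction M with
  | zero => rfl
  | succ M ih =>
    have h1 : 2 * (M + 1) = (2 * M + 1) + 1 := by ring
    rw [h1, List.range_succ, List.range_succ, List.range_succ]
    simp only [List.map_append, List.map_cons, List.map_nil, List.flatMap_append,
      List.flatMap_cons, List.flatMap_nil, ih]
    simp

lemma pvBS_snoc (k : Nat) :
    pvBS (k + 1) = (pvBS k).flatMap (fun b => [b ++ ['0'], b ++ ['1']]) := by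
  induction k with
  | zero => rfl
  | succ k ih =>
    have hs1 : pvBS (k + 1 + 1) = (pvBS (k + 1)).map ('0' :: ·) ++ (pvBS (k + 1)).map ('1' :: ·) := rfl
    have hs2 : pvBS (k + 1) = (pvBS k).map ('0' :: ·) ++ (pvBS k).map ('1' :: ·) := rfl
    rw [hs1]
    conv_lhs => rw [ih]
    conv_rhs => rw [hs2]
    simp only [List.map_flatMap, List.flatMap_append, List.flatMap_map]
    simp

lemma range_map_natBits (k : Nat) :
    (List.range (2 ^ k)).map (pvNatBits k) = pvBS k := by
  induction k with
  | zero => rfl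
  | succ k ih =>
    have h2 : 2 ^ (k + 1) = 2 * 2 ^ k := by ring
    rw [h2, range_double]
    have step : (fun m : Nat => [pvNatBits (k + 1) (2 * m), pvNatBits (k + 1) (2 * m + 1)])
        = fun m : Nat => [pvNatBits k m ++ ['0'], pvNatBits k m ++ ['1']] := by
      funext m
      rw [pvNatBits, pvNatBits]
      have e1 : 2 * m / 2 = m := by omega
      have e2 : (2 * m + 1) / 2 = m := by omega
      have e3 : 2 * m % 2 = 0 := by omega
      have e4 : (2 * m + 1) % 2 = 1 := by omega
      rw [e1, e2, e3, e4]
      rfl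
    rw [step, pvBS_snoc, ← ih, List.flatMap_map]

lemma pvBitsPerms_eq {k : Nat} (hk : 1 ≤ k) : pvBitsPerms k = pvBS k := by
  unfold pvBitsPerms
  rw [PySem.List.pyRange_one]
  have hN : ((2 : Int) ^ k - 0).toNat = 2 ^ k := by
    rw [sub_zero, show ((2 : Int) ^ k) = ((2 ^ k : Nat) : Int) by push_cast; ring]
    exact Int.toNat_natCast _
  rw [hN, List.map_map]
  rw [← range_map_natBits k]
  apply List.map_congr_left
  intro m hm
  have hmlt : m < 2 ^ k := List.mem_range.mp hm
  simp only [Function.comp]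
  have h0 : (0 : Int) + (m : Int) = (m : Int) := by omega
  rw [h0, toBinChars0b_nat m]
  rw [replace_0b _ (fun hb => by
    rcases pvDigits_mem hb with h | h <;> simp at h)]
  exact zfill_digits hk hmlt

lemma pvBitsPerms_zero : pvBitsPerms 0 = [['0']] := by decide

lemma mem_pvBS {k : Nat} {b : List Char} (h : b ∈ pvBS k) :
    b.length = k ∧ ∀ c ∈ b, c = '0' ∨ c = '1' := by
  induction k generalizing b with
  | zero =>
    simp only [pvBS, List.mem_singleton] at h
    subst h
    exact ⟨rfl, by simp⟩
  | succ k ih =>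
    rw [pvBS] at h
    rcases List.mem_append.mp h with h' | h' <;>
      (obtain ⟨b', hb', rfl⟩ := List.mem_map.mp h';
       obtain ⟨hl, hm⟩ := ih hb';
       refine ⟨by simp [hl], ?_⟩;
       intro c hc;
       rcases List.mem_cons.mp hc with rfl | hc')
    · left; rfl
    · exact hm c hc'
    · right; rfl
    · exact hm c hc' 

lemma replaceFirst_noX {l : List Char} (h : l.count 'X' = 0) (b : Char) :
    pvReplaceFirstX l b = l := by
  induction l with
  | nil => rfl
  | cons c t ih =>
    rw [List.count_cons] at h
    have hc : c ≠ 'X' := by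
      intro hh
      simp [hh] at h
    rw [pvReplaceFirstX, if_neg hc, ih (by omega)]

lemma foldl_replace_pass {c : Char} (hc : c ≠ 'X') (t bits : List Char) :
    bits.foldl (fun a b => pvReplaceFirstX a b) (c :: t)
      = c :: bits.foldl (fun a b => pvReplaceFirstX a b) t := by
  induction bits generalizing t with
  | nil => rfl
  | cons b bs ih =>
    simp only [List.foldl_cons]
    rw [pvReplaceFirstX, if_neg hc, ih]

lemma pvFill_cons_X (t : List Char) (b : Char) (bs : List Char) :
    pvFill ('X' :: t) (b :: bs) = b :: pvFill t bs := rfl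

lemma pvFill_cons_ne {c : Char} (hc : c ≠ 'X') (t bs : List Char) :
    pvFill (c :: t) bs = c :: pvFill t bs := by
  rw [pvFill.eq_def]
  simp [hc]

lemma foldl_replace_fill : ∀ (l bits : List Char), (∀ b ∈ bits, b ≠ 'X') → bits.length = l.count 'X' →
    bits.foldl (fun a b => pvReplaceFirstX a b) l = pvFill l bits := by
  intro l
  induction l with
  | nil =>
    intro bits _ hlen
    simp at hlen
    subst hlen
    rfl
  | cons c t ih =>
    intro bits hmem hlen
    by_cases hc : c = 'X'
    · subst hc
      rw [List.count_cons_self] at hlen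
      cases bits with
      | nil => simp at hlen
      | cons b bs =>
        simp only [List.foldl_cons]
        rw [pvReplaceFirstX, if_pos rfl]
        have hb : b ≠ 'X' := hmem b List.mem_cons_self
        rw [foldl_replace_pass hb]
        rw [ih bs (fun x hx => hmem x (List.mem_cons_of_mem _ hx)) (by simpa using hlen)]
        rw [pvFill_cons_X]
    · rw [List.count_cons_of_ne hc] at hlen
      rw [foldl_replace_pass hc, ih bits hmem hlen, pvFill_cons_ne hc]

lemma pvFill_nil {l : List Char} (h : l.count 'X' = 0) : pvFill l [] = l := by
  induction l with
  | nil => rfl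
  | cons c t ih =>
    rw [List.count_cons] at h
    have hc : c ≠ 'X' := by
      intro hh
      simp [hh] at h
    rw [pvFill, if_neg hc, ih (by omega)]

lemma map_fill_bs : ∀ l : List Char, (pvBS (l.count 'X')).map (pvFill l) = pvPerms l := by
  intro l
  induction l with
  | nil => rfl
  | cons c t ih =>
    by_cases hc : c = 'X'
    · subst hc
      rw [List.count_cons_self, pvPerms, if_pos rfl]
      have hstep : pvBS (List.count 'X' t + 1)
          = (pvBS (List.count 'X' t)).map ('0' :: ·) ++ (pvBS (List.count 'X' t)).map ('1' :: ·) := rfl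
      rw [hstep]
      simp only [List.map_append, List.map_map]
      congr 1 <;>
        (rw [← ih, List.map_map]; apply List.map_congr_left; intro b _; simp [Function.comp, pvFill_cons_X])
    · rw [List.count_cons_of_ne hc, pvPerms, if_neg hc, ← ih, List.map_map]
      apply List.map_congr_left
      intro b _
      simp only [Function.comp]
      rw [pvFill_cons_ne hc]

lemma A_eq (s : String) :
    get_addresses_permutations_py s = (pvPerms s.toList).map String.ofList := by
  unfold get_addresses_permutations_py
  rw [PySem.List.foldl_append_singleton_eq_map]
  rw [count_X]
  by_cases hk : s.toList.count 'X' = 0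
  · rw [hk, pvBitsPerms_zero]
    have hperm : pvPerms s.toList = [s.toList] := by
      rw [← map_fill_bs, hk]
      show [pvFill s.toList []] = [s.toList]
      rw [pvFill_nil hk]
    rw [hperm]
    simp only [List.map_cons, List.map_nil, List.foldl_cons, List.foldl_nil, List.nil_append]
    rw [replaceFirst_noX hk]
  · rw [pvBitsPerms_eq (by omega)]
    rw [← map_fill_bs, List.map_map]
    apply List.map_congr_left
    intro b hb
    obtain ⟨hlen, hmem⟩ := mem_pvBS hb
    simp only [Function.comp]
    congr 1
    exact foldl_replace_fill s.toList b
      (fun x hx => by rcases hmem x hx with h | h <;> subst h <;> decide)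
      (by rw [hlen])

lemma modifyHead_nil_append (l : List (List Char)) :
    l.modifyHead (fun x => [] ++ x) = l := by
  cases l <;> simp

lemma pvSplit_cons_X (t : List Char) : pvSplit ('X' :: t) = [] :: pvSplit t := by
  rw [pvSplit.eq_def]
  simp

lemma pvSplit_cons_ne {c : Char} (hc : c ≠ 'X') (t : List Char) :
    pvSplit (c :: t) = (pvSplit t).modifyHead (c :: ·) := by
  rw [pvSplit.eq_def]
  simp [hc]

lemma pvCombos_cons (p : List Char) (ps : List (List Char)) :
    pvCombos (p :: ps) = (pvCombos ps).map (('0' :: p) ++ ·) ++ (pvCombos ps).map (('1' :: p) ++ ·) := by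
  rw [pvCombos.eq_def]

lemma splitOn_go_X : ∀ (l : List Char) (fuel : Nat) (cur : List Char) (acc : List (List Char)),
    l.length < fuel →
    PySem.Chars.splitOn.go ['X'] fuel l cur acc
      = acc.reverse ++ (pvSplit l).modifyHead (cur.reverse ++ ·) := by
  intro l
  induction l with
  | nil =>
    intro fuel cur acc hf
    cases fuel with
    | zero => omega
    | succ f => simp [PySem.Chars.splitOn.go, pvSplit]
  | cons c t ih =>
    intro fuel cur acc hf
    cases fuel with
    | zero => simp at hf
    | succ f =>
      simp only [List.length_cons] at hf
      by_cases hc : c = 'X'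
      · subst hc
        simp only [PySem.Chars.splitOn.go, List.isPrefixOf, BEq.rfl, Bool.and_eq_true, and_true]
        rw [if_pos (by simp [List.isPrefixOf])]
        have hd : List.drop ['X'].length ('X' :: t) = t := by simp
        rw [hd, ih f [] (cur.reverse :: acc) (by omega)]
        rw [pvSplit_cons_X, List.modifyHead_cons]
        simp only [List.reverse_nil]
        rw [modifyHead_nil_append]
        simp
      · have hpre : List.isPrefixOf ['X'] (c :: t) = false := by
          simp [List.isPrefixOf]
          exact fun h => (hc h.symm).elim
        simp only [PySem.Chars.splitOn.go]
        rw [if_neg (by simp [hpre])]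
        rw [ih f (c :: cur) acc (by omega)]
        rw [pvSplit_cons_ne hc, List.modifyHead_modifyHead]
        congr 2
        funext x
        simp

lemma splitOn_X (l : List Char) : PySem.Chars.splitOn l ['X'] = pvSplit l := by
  simp only [PySem.Chars.splitOn]
  rw [splitOn_go_X l (l.length + 1) [] [] (by omega)]
  simp only [List.reverse_nil, List.nil_append]
  exact modifyHead_nil_append _

lemma pvSplit_ne_nil (l : List Char) : pvSplit l ≠ [] := by
  induction l with
  | nil => simp [pvSplit]
  | cons c t ih =>
    by_cases hc : c = 'X'
    · subst hc
      rw [pvSplit_cons_X]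
      simp
    · rw [pvSplit_cons_ne hc]
      cases h : pvSplit t with
      | nil => exact absurd h ih
      | cons a b => simp

lemma foldl_combos : ∀ (ps : List (List Char)) (acc : List (List Char)),
    ps.foldl (fun addresses part =>
        addresses.flatMap (fun address => ['0', '1'].map (fun bit => address ++ [bit] ++ part))) acc
      = acc.flatMap (fun a => (pvCombos ps).map (a ++ ·)) := by
  intro ps
  induction ps with
  | nil =>
    intro acc
    simp [pvCombos]
  | cons p ps ih =>
    intro acc
    simp only [List.foldl_cons]
    rw [ih]
    rw [List.flatMap_assoc]
    apply List.flatMap_congr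
    intro a _
    rw [pvCombos_cons]
    simp [List.flatMap_cons, List.map_append, List.map_map, Function.comp_def, List.append_assoc]

lemma perms_split : ∀ l : List Char,
    pvPerms l = (pvCombos (pvSplit l).tail).map ((pvSplit l).headD [] ++ ·) := by
  intro l
  induction l with
  | nil => rfl
  | cons c t ih =>
    obtain ⟨h, tl, hht⟩ := List.exists_cons_of_ne_nil (pvSplit_ne_nil t)
    by_cases hc : c = 'X'
    · subst hc
      rw [pvPerms, if_pos rfl]
      rw [pvSplit_cons_X]
      simp only [List.tail_cons, List.headD_cons]
      rw [hht, pvCombos_cons]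
      have hid : ∀ L : List (List Char), L.map (([] : List Char) ++ ·) = L := by
        intro L
        simp
      rw [hid]
      rw [ih, hht]
      simp only [List.tail_cons, List.headD_cons]
      simp only [List.map_append, List.map_map]
      congr 1 <;> (apply List.map_congr_left; intro x _; simp [Function.comp])
    · rw [pvPerms, if_neg hc]
      rw [pvSplit_cons_ne hc]
      rw [hht, List.modifyHead_cons]
      simp only [List.tail_cons, List.headD_cons]
      rw [ih, hht]
      simp only [List.tail_cons, List.headD_cons, List.map_map]
      apply List.map_congr_left
      intro x _
      simp [Function.comp]

lemma B_eq (s : String) :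
    get_addresses_permutations_py_alt s = (pvPerms s.toList).map String.ofList := by
  unfold get_addresses_permutations_py_alt
  rw [splitOn_X]
  obtain ⟨h, tl, hht⟩ := List.exists_cons_of_ne_nil (pvSplit_ne_nil s.toList)
  rw [hht]
  simp only [List.tail_cons, List.headD_cons]
  rw [foldl_combos]
  rw [perms_split s.toList, hht]
  simp only [List.tail_cons, List.headD_cons]
  simp [List.flatMap_cons]

-- ===== VERDICT (by name: the statement is the Claim_ definition above) =====
theorem get_addresses_permutations_py_spec : Claim_equal_get_addresses_permutations_py := by
  intro s _
  unfold Spec_get_addresses_permutations_py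
  rw [A_eq, B_eq]
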